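-- pv_equiv track=rewrite | github.com/cirosantilli/cirosantilli.github.io | euler/949.py | _simplest_between
-- ===== SOURCE A (Python) =====
-- def _ceil_div_pow2(x: int, s: int) -> int:
--     if s == 0:
--         return x
--     d = 1 << s
--     return (x + (d - 1)) >> s if x >= 0 else -((-x) >> s)
--
-- def _simplest_between(u: int, d: int, e: int) -> int:
--     for m in range(e + 1):
--         s = e - m
--         p_min = (u >> s) + 1
--         p_max = _ceil_div_pow2(d, s) - 1
--         if p_min <= p_max:
--             if p_min > 0:
--                 p = p_min
--             elif p_max < 0:
--                 p = p_max
--             else: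
--                 p = 0
--             if m > 0 and p and (p & 1) == 0:
--                 if p + 1 <= p_max and ((p + 1) & 1):
--                     p += 1
--                 elif p - 1 >= p_min and ((p - 1) & 1):
--                     p -= 1
--             return p << s
--     return 0
-- ===== SOURCE B (Python) =====
-- def _simplest_between(u: int, d: int, e: int) -> int:
--     # Binary search the smallest m (= largest shift s = e - m) for which an
--     # integer lies strictly between u/2^s and d/2^s; the feasibility predicate
--     # is monotone in m, so the first feasible m is found in O(log e) probes.
--     if e < 0 or u + 2 > d:
--         return 0
--
--     def ok(m: int) -> bool:
--         s = e - m
--         return (u >> s) + 1 <= -((-d) >> s) - 1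
--
--     lo, hi = 0, e
--     while lo < hi:
--         mid = (lo + hi) // 2
--         if ok(mid):
--             hi = mid
--         else:
--             lo = mid + 1
--     m = lo
--     s = e - m
--     p_min = (u >> s) + 1
--     p_max = -((-d) >> s) - 1
--     p = min(max(p_min, 0), p_max)
--     if m > 0 and p != 0 and p % 2 == 0:
--         if p + 1 <= p_max:
--             p += 1
--         elif p - 1 >= p_min:
--             p -= 1
--     return p << s
-- ===== Notes on version B (the rewrite author's own statement) =====
-- stated objective: faster
-- what changed: Replaces A's linear scan of m = 0..e (each iteration materialising 1 << s) by a binary search over the monotone feasibility predicate 'some integer lies strictly between u/2^s and d/2^s', then runs the selection body once at the first feasible m; B also computes the ceiling as -((-d) >> s) instead of building 1 << s.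
import Mathlib
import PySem

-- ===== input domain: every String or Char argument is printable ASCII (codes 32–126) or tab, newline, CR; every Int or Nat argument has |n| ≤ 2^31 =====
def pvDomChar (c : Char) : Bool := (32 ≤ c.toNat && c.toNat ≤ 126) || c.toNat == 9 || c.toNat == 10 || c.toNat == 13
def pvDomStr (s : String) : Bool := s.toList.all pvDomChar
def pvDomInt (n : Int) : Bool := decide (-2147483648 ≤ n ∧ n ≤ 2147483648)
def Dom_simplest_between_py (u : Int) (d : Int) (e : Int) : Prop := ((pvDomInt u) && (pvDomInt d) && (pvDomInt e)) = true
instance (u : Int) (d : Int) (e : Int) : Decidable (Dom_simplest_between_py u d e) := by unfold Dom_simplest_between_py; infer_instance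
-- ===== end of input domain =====

-- B replaces A's linear scan over m (O(e) iterations, each building 1 << s) by a
-- binary search on the monotone feasibility predicate (O(log e) probes): faster, asymptotic.


-- ===== PORT A =====
-- _ceil_div_pow2: `1 << s` is `(1 : Int) <<< s.toNat`, `>> s` is `>>> s.toNat` (A only calls it with s ≥ 0)
def pyCeilDivPow2 (x : Int) (s : Int) : Int :=
  if s = 0 then x
  else
    let d := (1 : Int) <<< s.toNat
    if x ≥ 0 then (x + (d - 1)) >>> s.toNat else -((-x) >>> s.toNat)

-- the for-loop of _simplest_between: fuel = number of remaining iterations, m the loop variable;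
-- `p & 1` is PySem.Int.band p 1, truthiness of an int is ≠ 0
def goA (u : Int) (d : Int) (e : Int) : Nat → Int → Int
  | 0, _ => 0
  | Nat.succ n, m =>
    let s := e - m
    let p_min := (u >>> s.toNat) + 1
    let p_max := pyCeilDivPow2 d s - 1
    if p_min ≤ p_max then
      let p := if p_min > 0 then p_min else if p_max < 0 then p_max else 0
      let p :=
        if m > 0 ∧ p ≠ 0 ∧ PySem.Int.band p 1 = 0 then
          if p + 1 ≤ p_max ∧ PySem.Int.band (p + 1) 1 ≠ 0 then p + 1
          else if p - 1 ≥ p_min ∧ PySem.Int.band (p - 1) 1 ≠ 0 then p - 1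
          else p
        else p
      p <<< s.toNat
    else goA u d e n (m + 1)

def simplest_between_py (u : Int) (d : Int) (e : Int) : Int :=
  goA u d e (e + 1).toNat 0

-- ===== PORT B =====
-- Source B's ok(m): is there an integer strictly between u/2^s and d/2^s, s = e - m
def okB (u : Int) (d : Int) (e : Int) (m : Int) : Bool :=
  let s := e - m
  decide ((u >>> s.toNat) + 1 ≤ -((-d) >>> s.toNat) - 1)

-- Source B's while-loop: binary search for the smallest feasible m
def bsearchB (u : Int) (d : Int) (e : Int) (lo : Int) (hi : Int) : Int :=
  if h : lo < hi then
    let mid := PySem.Int.floordiv (lo + hi) 2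
    if okB u d e mid then bsearchB u d e lo mid else bsearchB u d e (mid + 1) hi
  else lo
termination_by (hi - lo).toNat
decreasing_by
  · have h1 := PySem.Int.floordiv_two_mid_bounds (lo := lo) (hi := hi) (le_of_lt h)
    have h2 : PySem.Int.floordiv (lo + hi) 2 < hi := by
      rw [PySem.Int.floordiv_lt_iff_lt_mul (by omega)]; omega
    omega
  · have h1 := PySem.Int.floordiv_two_mid_bounds (lo := lo) (hi := hi) (le_of_lt h)
    omega

def simplest_between_py_alt (u : Int) (d : Int) (e : Int) : Int :=
  if e < 0 ∨ u + 2 > d then 0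
  else
    let m := bsearchB u d e 0 e
    let s := e - m
    let p_min := (u >>> s.toNat) + 1
    let p_max := -((-d) >>> s.toNat) - 1
    let p := min (max p_min 0) p_max
    let p :=
      if m > 0 ∧ p ≠ 0 ∧ p % 2 = 0 then
        if p + 1 ≤ p_max then p + 1
        else if p - 1 ≥ p_min then p - 1
        else p
      else p
    p <<< s.toNat

-- ===== PRECONDITION & SPEC =====
def Spec_simplest_between_py (u : Int) (d : Int) (e : Int) (out : Int) : Prop := out = simplest_between_py_alt u d e
instance (u : Int) (d : Int) (e : Int) (out : Int) : Decidable (Spec_simplest_between_py u d e out) := by unfold Spec_simplest_between_py; infer_instance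

-- ===== CLAIM (what is proved, stated in full; the proofs are below) =====
def Claim_equal_simplest_between_py : Prop := ∀ (u : Int) (d : Int) (e : Int), Dom_simplest_between_py u d e → Spec_simplest_between_py u d e (simplest_between_py u d e)

-- ===== LEMMAS AND PROOFS =====

theorem shiftR_fd (x : Int) (k : Nat) : x >>> k = PySem.Int.floordiv x (2 ^ k) := by
  rw [Int.shiftRight_eq_div_pow, PySem.Int.floordiv_eq_ediv_of_pos (by positivity)]
  push_cast; rfl

theorem shiftL_mul (x : Int) (k : Nat) : x <<< k = x * 2 ^ k := by
  rw [Int.shiftLeft_eq]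

-- the feasibility predicate says: some integer p has u < p·2^s < d
theorem okB_iff (u d e m : Int) :
    okB u d e m = true ↔
      ∃ p : Int, u < p * 2 ^ (e - m).toNat ∧ p * 2 ^ (e - m).toNat < d := by
  simp only [okB, shiftR_fd, decide_eq_true_iff]
  set b : Int := 2 ^ (e - m).toNat with hbdef
  have hb : 0 < b := by positivity
  constructor
  · intro h
    refine ⟨PySem.Int.floordiv u b + 1, ?_, ?_⟩
    · have := (PySem.Int.floordiv_eq_iff_of_pos hb (a := u) (q := PySem.Int.floordiv u b)).mp rfl
      linarith [this.2]
    · have hc := (PySem.Int.neg_floordiv_neg_eq_iff_of_pos hb (a := d)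
        (q := -(PySem.Int.floordiv (-d) b))).mp rfl
      have h1 : PySem.Int.floordiv u b + 1 ≤ -(PySem.Int.floordiv (-d) b) - 1 := h
      have h2 : (PySem.Int.floordiv u b + 1) * b ≤ (-(PySem.Int.floordiv (-d) b) - 1) * b :=
        mul_le_mul_of_nonneg_right h1 (le_of_lt hb)
      nlinarith [hc.1]
  · rintro ⟨p, h1, h2⟩
    have hlt : PySem.Int.floordiv u b < p := by
      rw [PySem.Int.floordiv_lt_iff_lt_mul hb]; exact h1
    have hc := (PySem.Int.neg_floordiv_neg_eq_iff_of_pos hb (a := d)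
      (q := -(PySem.Int.floordiv (-d) b))).mp rfl
    have hp : p < -(PySem.Int.floordiv (-d) b) := by
      by_contra hcon
      push_neg at hcon
      have := mul_le_mul_of_nonneg_right hcon (le_of_lt hb)
      linarith [hc.2]
    omega

theorem okB_imp_sep (u d e m : Int) (h : okB u d e m = true) : u + 2 ≤ d := by
  obtain ⟨p, h1, h2⟩ := (okB_iff u d e m).mp h
  omega

theorem okB_top (u d e : Int) (he : 0 ≤ e) (hsep : u + 2 ≤ d) : okB u d e e = true := by
  rw [okB_iff]
  exact ⟨u + 1, by simp, by simp; omega⟩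

theorem okB_step (u d e m : Int) (hm : m < e) (h : okB u d e m = true) :
    okB u d e (m + 1) = true := by
  obtain ⟨p, h1, h2⟩ := (okB_iff u d e m).mp h
  rw [okB_iff]
  have hk : (e - m).toNat = (e - (m + 1)).toNat + 1 := by omega
  rw [hk, pow_succ] at h1 h2
  exact ⟨2 * p, by nlinarith, by nlinarith⟩

theorem okB_mono (u d e m m' : Int) (hmm : m ≤ m') (hm'e : m' ≤ e)
    (h : okB u d e m = true) : okB u d e m' = true := by
  have hn : ∀ (n : Nat) (m' : Int), (m' - m).toNat = n → m ≤ m' → m' ≤ e →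
      okB u d e m' = true := by
    intro n
    induction n with
    | zero =>
      intro m' hn0 hle _
      have hEq : m' = m := by omega
      subst hEq; exact h
    | succ k ih =>
      intro m' hn0 hle he'
      have h1 : okB u d e (m' - 1) = true := ih (m' - 1) (by omega) (by omega) (by omega)
      have := okB_step u d e (m' - 1) (by omega) h1
      simpa using this
  exact hn (m' - m).toNat m' rfl hmm hm'e

theorem bsearch_eq (u d e M : Int) (h0 : 0 ≤ M) (hok : okB u d e M = true)
    (hleast : ∀ m, 0 ≤ m → m < M → okB u d e m = false) :
    ∀ (n : Nat) (lo hi : Int), (hi - lo).toNat = n → 0 ≤ lo → lo ≤ M → M ≤ hi → hi ≤ e →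
      bsearchB u d e lo hi = M := by
  intro n
  induction n using Nat.strong_induction_on with
  | _ n ih =>
    intro lo hi hn hlo0 hloM hMhi hhie
    rw [bsearchB]
    by_cases h : lo < hi
    · simp only [h, dif_pos]
      have hmid := PySem.Int.floordiv_two_mid_bounds (lo := lo) (hi := hi) (le_of_lt h)
      have hmidlt : PySem.Int.floordiv (lo + hi) 2 < hi := by
        rw [PySem.Int.floordiv_lt_iff_lt_mul (by omega)]; omega
      set mid := PySem.Int.floordiv (lo + hi) 2 with hmiddef
      by_cases hokm : okB u d e mid = true
      · simp only [hokm, if_pos]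
        have hMmid : M ≤ mid := by
          by_contra hcon
          push_neg at hcon
          have := hleast mid (by omega) hcon
          rw [this] at hokm; exact absurd hokm (by simp)
        exact ih (mid - lo).toNat (by omega) lo mid rfl hlo0 hloM hMmid (by omega)
      · simp only [hokm, if_neg, if_false]
        have hmidM : mid < M := by
          by_contra hcon
          push_neg at hcon
          exact hokm (okB_mono u d e M mid hcon (by omega) hok)
        exact ih (hi - (mid + 1)).toNat (by omega) (mid + 1) hi rfl (by omega) (by omega) hMhi hhie
    · simp only [h, dif_neg, not_false_iff]
      omega

-- A's ceiling helper agrees with B's -((-d) >> s) for the s ≥ 0 it is called with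
theorem ceil_eq (x s : Int) (hs : 0 ≤ s) : pyCeilDivPow2 x s = -((-x) >>> s.toNat) := by
  by_cases h0 : s = 0
  · subst h0
    simp [pyCeilDivPow2, shiftR_fd, PySem.Int.floordiv_eq_ediv_of_pos (show (0:Int) < 2^0 by norm_num)]
  · simp only [pyCeilDivPow2, h0, if_false, shiftL_mul, one_mul, shiftR_fd]
    by_cases hx : x ≥ 0
    · simp only [hx, if_pos]
      set b : Int := 2 ^ s.toNat with hbdef
      have hb : 0 < b := by positivity
      set c : Int := -(PySem.Int.floordiv (-x) b) with hcdef
      have hc := (PySem.Int.neg_floordiv_neg_eq_iff_of_pos hb (a := x) (q := c)).mp rfl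
      rw [PySem.Int.floordiv_eq_iff_of_pos hb]
      constructor <;> nlinarith [hc.1, hc.2]
    · simp [hx]

-- goA's loop test at m equals okB m (for m ≤ e)
theorem okA_iff (u d e m : Int) (hme : m ≤ e) :
    ((u >>> (e - m).toNat) + 1 ≤ pyCeilDivPow2 d (e - m) - 1) ↔ okB u d e m = true := by
  rw [ceil_eq d (e - m) (by omega)]
  simp [okB, decide_eq_true_iff]

-- no feasible m at all: the loop falls through and returns 0
theorem goA_none (u d e : Int) (hno : ∀ m, 0 ≤ m → m ≤ e → okB u d e m = false) :
    ∀ (n : Nat) (m : Int), 0 ≤ m → m + n ≤ e + 1 → goA u d e n m = 0 := by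
  intro n
  induction n with
  | zero => intro m _ _; rfl
  | succ k ih =>
    intro m hm0 hme
    rw [goA]
    have hcond : ¬ ((u >>> (e - m).toNat) + 1 ≤ pyCeilDivPow2 d (e - m) - 1) := by
      rw [okA_iff u d e m (by omega)]
      simp [hno m hm0 (by omega)]
    simp only [hcond, if_neg, if_false, not_false_iff]
    exact ih (m + 1) (by omega) (by omega)

-- the loop from m reaches the least feasible M and stops there
theorem goA_finds (u d e M : Int) (h0 : 0 ≤ M) (hMe : M ≤ e) (hok : okB u d e M = true)
    (hleast : ∀ m, 0 ≤ m → m < M → okB u d e m = false) :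
    ∀ (n : Nat) (m : Int), 0 ≤ m → m ≤ M → m + n = e + 1 → goA u d e n m = goA u d e 1 M := by
  intro n
  induction n with
  | zero => intro m _ hle h; omega
  | succ k ih =>
    intro m hm0 hmM hfuel
    by_cases heq : m = M
    · subst heq
      rw [goA, goA]
      have hcond : ((u >>> (e - m).toNat) + 1 ≤ pyCeilDivPow2 d (e - m) - 1) :=
        (okA_iff u d e m hMe).mpr hok
      simp only [hcond, if_pos]
    · rw [goA]
      have hcond : ¬ ((u >>> (e - m).toNat) + 1 ≤ pyCeilDivPow2 d (e - m) - 1) := by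
        rw [okA_iff u d e m (by omega)]
        simp [hleast m hm0 (by omega)]
      simp only [hcond, if_neg, if_false, not_false_iff]
      exact ih (m + 1) (by omega) (by omega) (by omega)

-- the selection bodies of A and B agree (A's parity guards on p±1 are vacuous: p is even there)
theorem sel_core (m p_min p_max : Int) (h : p_min ≤ p_max) :
    (if m > 0 ∧ (if p_min > 0 then p_min else if p_max < 0 then p_max else 0) ≠ 0 ∧
        PySem.Int.band (if p_min > 0 then p_min else if p_max < 0 then p_max else 0) 1 = 0 then
       if (if p_min > 0 then p_min else if p_max < 0 then p_max else 0) + 1 ≤ p_max ∧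
           PySem.Int.band ((if p_min > 0 then p_min else if p_max < 0 then p_max else 0) + 1) 1 ≠ 0 then
         (if p_min > 0 then p_min else if p_max < 0 then p_max else 0) + 1
       else if (if p_min > 0 then p_min else if p_max < 0 then p_max else 0) - 1 ≥ p_min ∧
           PySem.Int.band ((if p_min > 0 then p_min else if p_max < 0 then p_max else 0) - 1) 1 ≠ 0 then
         (if p_min > 0 then p_min else if p_max < 0 then p_max else 0) - 1
       else (if p_min > 0 then p_min else if p_max < 0 then p_max else 0)
     else (if p_min > 0 then p_min else if p_max < 0 then p_max else 0)) =
    (if m > 0 ∧ min (max p_min 0) p_max ≠ 0 ∧ min (max p_min 0) p_max % 2 = 0 then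
       if min (max p_min 0) p_max + 1 ≤ p_max then min (max p_min 0) p_max + 1
       else if min (max p_min 0) p_max - 1 ≥ p_min then min (max p_min 0) p_max - 1
       else min (max p_min 0) p_max
     else min (max p_min 0) p_max) := by
  simp only [PySem.Int.band_one, PySem.Int.mod_eq_emod_of_pos (show (0:Int) < 2 by norm_num)]
  split_ifs <;> omega

-- at the found m, A's loop body computes exactly B's tail
theorem step_eq (u d e M : Int) (hMe : M ≤ e) (hok : okB u d e M = true) :
    goA u d e 1 M =
      (let s := e - M
       let p_min := (u >>> s.toNat) + 1
       let p_max := -((-d) >>> s.toNat) - 1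
       let p := min (max p_min 0) p_max
       let p :=
         if M > 0 ∧ p ≠ 0 ∧ p % 2 = 0 then
           if p + 1 ≤ p_max then p + 1
           else if p - 1 ≥ p_min then p - 1
           else p
         else p
       p <<< s.toNat) := by
  rw [goA]
  have hce := ceil_eq d (e - M) (by omega)
  have hpm : (u >>> (e - M).toNat) + 1 ≤ -((-d) >>> (e - M).toNat) - 1 := by
    have h := (okA_iff u d e M hMe).mpr hok
    rwa [hce] at h
  simp only [hce]
  rw [if_pos hpm]
  rw [sel_core M _ _ hpm]

theorem ab_eq (u d e : Int) : simplest_between_py u d e = simplest_between_py_alt u d e := by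
  unfold simplest_between_py simplest_between_py_alt
  by_cases he : e < 0
  · have : (e + 1).toNat = 0 := by omega
    rw [this]
    simp [goA, he]
  · push_neg at he
    by_cases hsep : u + 2 > d
    · have hno : ∀ m, 0 ≤ m → m ≤ e → okB u d e m = false := by
        intro m _ _
        by_contra hcon
        have : okB u d e m = true := by
          cases h : okB u d e m
          · exact absurd h hcon
          · rfl
        exact absurd (okB_imp_sep u d e m this) (by omega)
      have hA : goA u d e (e + 1).toNat 0 = 0 := goA_none u d e hno (e + 1).toNat 0 le_rfl (by omega)
      simp [hA, hsep]
    · push_neg at hsep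
      have hgate : ¬ (e < 0 ∨ u + 2 > d) := by omega
      have htop : okB u d e e = true := okB_top u d e he hsep
      have hex : ∃ k : Nat, okB u d e (k : Int) = true :=
        ⟨e.toNat, by rwa [Int.toNat_of_nonneg he]⟩
      set M0 := Nat.find hex with hM0
      have hok : okB u d e (M0 : Int) = true := Nat.find_spec hex
      have hMe : (M0 : Int) ≤ e := by
        have : M0 ≤ e.toNat := Nat.find_min' hex (by rwa [Int.toNat_of_nonneg he])
        omega
      have hleast : ∀ m, 0 ≤ m → m < (M0 : Int) → okB u d e m = false := by
        intro m hm0 hmM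
        have hnm : ¬ okB u d e (m.toNat : Int) = true := Nat.find_min hex (by omega)
        rw [Int.toNat_of_nonneg hm0] at hnm
        cases h : okB u d e m
        · rfl
        · exact absurd h hnm
      have hbs : bsearchB u d e 0 e = (M0 : Int) :=
        bsearch_eq u d e (M0 : Int) (by omega) hok hleast (e - 0).toNat 0 e rfl le_rfl
          (by omega) hMe le_rfl
      have hA : goA u d e (e + 1).toNat 0 = goA u d e 1 (M0 : Int) :=
        goA_finds u d e (M0 : Int) (by omega) hMe hok hleast (e + 1).toNat 0 le_rfl (by omega)
          (by omega)
      rw [hA, step_eq u d e (M0 : Int) hMe hok]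
      simp only [hgate, if_neg, not_false_iff, hbs]

-- ===== VERDICT (by name: the statement is the Claim_ definition above) =====
theorem simplest_between_py_spec : Claim_equal_simplest_between_py := by
  intro u d e _
  unfold Spec_simplest_between_py
  exact ab_eq u d e
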